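-- pv_equiv track=rewrite | github.com/Hamahmi/CompilersLab | task1.py | check_valid_dfa
-- ===== SOURCE A (Python) =====
-- def check_valid_dfa(string):
--     if not ("#" in string):
--         return False
--
--     splitted = string.split("#")
--     if len(splitted) != 2:
--         return False
--
--     states = splitted[0].split(";")
--     for state in states:
--         if len(state.split(",")) != 3:
--             return False
--     return True
-- ===== SOURCE B (Python) =====
-- def check_valid_dfa(string):
--     # One left-to-right scan: count commas per semicolon-separated state before
--     # the single hash separator, then ensure no second hash occurs.
--     commas = 0
--     hashes = 0
--     for ch in string:
--         if hashes == 0: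
--             if ch == ',':
--                 commas += 1
--             elif ch == ';':
--                 if commas != 2:
--                     return False
--                 commas = 0
--             elif ch == '#':
--                 if commas != 2:
--                     return False
--                 hashes = 1
--         elif ch == '#':
--             return False
--     return hashes == 1
-- ===== Notes on version B (the rewrite author's own statement) =====
-- stated objective: alternative
-- what changed: Replaces A's three split() passes (on the hash, semicolon and comma separators) and list allocations by a single left-to-right character scan that keeps only a comma counter and a hash flag.
import Mathlib
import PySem

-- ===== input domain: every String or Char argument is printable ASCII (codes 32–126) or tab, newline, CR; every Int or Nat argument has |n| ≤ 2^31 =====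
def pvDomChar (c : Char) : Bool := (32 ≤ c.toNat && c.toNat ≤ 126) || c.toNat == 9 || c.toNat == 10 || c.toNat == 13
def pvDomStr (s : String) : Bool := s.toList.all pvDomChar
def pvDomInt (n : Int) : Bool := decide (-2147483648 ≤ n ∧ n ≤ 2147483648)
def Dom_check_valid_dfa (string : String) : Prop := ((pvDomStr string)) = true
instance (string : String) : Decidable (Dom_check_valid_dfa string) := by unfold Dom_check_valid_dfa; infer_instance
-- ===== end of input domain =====

-- B replaces A's split/split/split traversal by one left-to-right character scan
-- keeping only two counters (objective: alternative, single pass, no intermediate lists).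

-- ===== PORT A =====
def check_valid_dfa (string : String) : Bool :=
  if !(PySem.Str.isIn "#" string) then false
  else
    if !((PySem.Chars.splitOn string.toList "#".toList).length == 2) then false
    else
      -- splitted[0]: splitted.length = 2 is checked just above, so headI is the exact index 0;
      -- 'for state in states: if len(state.split(",")) != 3: return False' then 'return True'
      (PySem.Chars.splitOn (PySem.Chars.splitOn string.toList "#".toList).headI ";".toList).all
        (fun state => (PySem.Chars.splitOn state ",".toList).length == 3)

-- ===== PORT B =====
-- the for-loop of Source B as structural recursion over the characters; early 'return False' = false
def bScan : List Char → Nat → Nat → Bool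
  | [], _, hashes => hashes == 1
  | ch :: t, commas, hashes =>
    if hashes == 0 then
      if ch == ',' then bScan t (commas + 1) hashes
      else if ch == ';' then (if !(commas == 2) then false else bScan t 0 hashes)
      else if ch == '#' then (if !(commas == 2) then false else bScan t commas 1)
      else bScan t commas hashes
    else if ch == '#' then false
    else bScan t commas hashes

def check_valid_dfa_alt (string : String) : Bool := bScan string.toList 0 0

-- ===== PRECONDITION & SPEC =====
def Spec_check_valid_dfa (string : String) (out : Bool) : Prop := out = check_valid_dfa_alt string
instance (string : String) (out : Bool) : Decidable (Spec_check_valid_dfa string out) := by unfold Spec_check_valid_dfa; infer_instance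

-- ===== CLAIM (what is proved, stated in full; the proofs are below) =====
def Claim_equal_check_valid_dfa : Prop := ∀ (string : String), Dom_check_valid_dfa string → Spec_check_valid_dfa string (check_valid_dfa string)

-- ===== LEMMAS AND PROOFS =====

-- simple single-character split, used only to reason about PySem.Chars.splitOn
def sp (sep : Char) : List Char → List (List Char)
  | [] => [[]]
  | c :: t => if c = sep then [] :: sp sep t else (c :: (sp sep t).headI) :: (sp sep t).tail

theorem sp_ne_nil (sep : Char) (l : List Char) : sp sep l ≠ [] := by
  cases l with
  | nil => simp [sp]
  | cons c t => simp only [sp]; split <;> simp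

theorem headI_cons_tail_of_ne_nil {α : Type} [Inhabited α] (l : List α) (h : l ≠ []) :
    l.headI :: l.tail = l := by
  cases l
  · exact absurd rfl h
  · rfl

theorem go_single (sep : Char) (fuel : Nat) (l cur : List Char) (acc : List (List Char))
    (h : l.length < fuel) :
    PySem.Chars.splitOn.go [sep] fuel l cur acc =
      acc.reverse ++ (cur.reverse ++ (sp sep l).headI) :: (sp sep l).tail := by
  induction fuel generalizing l cur acc with
  | zero => omega
  | succ fuel ih =>
    cases l with
    | nil => simp [PySem.Chars.splitOn.go, sp]
    | cons c rest =>
      simp only [PySem.Chars.splitOn.go]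
      by_cases hc : c = sep
      · have hpre : List.isPrefixOf [sep] (c :: rest) = true := by simp [List.isPrefixOf, hc]
        rw [if_pos hpre, show List.drop [sep].length (c :: rest) = rest by simp,
            ih rest [] (cur.reverse :: acc) (by simp at h ⊢; omega)]
        have hne := sp_ne_nil sep rest
        simp [sp, hc, headI_cons_tail_of_ne_nil _ hne]
      · have hpre : List.isPrefixOf [sep] (c :: rest) = false := by
          simp [List.isPrefixOf]
          intro hh; exact absurd hh.symm hc
        rw [if_neg (by simp [hpre])]
        rw [ih rest (c :: cur) acc (by simp at h ⊢; omega)]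
        simp [sp, hc]

theorem splitOn_eq_sp (cs : List Char) (sep : Char) :
    PySem.Chars.splitOn cs [sep] = sp sep cs := by
  have := go_single sep (cs.length + 1) cs [] [] (by omega)
  simpa [PySem.Chars.splitOn, headI_cons_tail_of_ne_nil _ (sp_ne_nil sep cs)] using this

theorem length_sp (sep : Char) (l : List Char) :
    (sp sep l).length = l.count sep + 1 := by
  induction l with
  | nil => simp [sp]
  | cons c t ih =>
    simp only [sp]
    by_cases hc : c = sep
    · simp [hc, ih]
    · have hne := sp_ne_nil sep t
      have hl : (sp sep t).tail.length = (sp sep t).length - 1 := by simp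
      have h1 : 1 ≤ (sp sep t).length := List.length_pos_of_ne_nil hne
      simp only [if_neg hc, List.length_cons, hl, ih, List.count_cons]
      simp [hc]
      try omega

theorem headI_sp (sep : Char) (l : List Char) :
    (sp sep l).headI = l.takeWhile (· ≠ sep) := by
  induction l with
  | nil => simp [sp]
  | cons c t ih =>
    simp only [sp]
    by_cases hc : c = sep
    · simp [hc]
    · simp [hc, ih]

-- B's nested check of the head state (initial comma credit c) followed by the rest
def okStates (c : Nat) : List (List Char) → Bool
  | [] => true
  | s :: rest => (c + s.count ',' == 2) && rest.all (fun st => st.count ',' == 2)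

theorem okStates_zero (sts : List (List Char)) (h : sts ≠ []) :
    okStates 0 sts = sts.all (fun st => st.count ',' == 2) := by
  cases sts with
  | nil => exact absurd rfl h
  | cons s rest => simp [okStates]

theorem okStates_nil_cons (c : Nat) (sts : List (List Char)) :
    okStates c ([] :: sts) = ((c == 2) && sts.all (fun st => st.count ',' == 2)) := by
  simp [okStates]

theorem bScan_one (t : List Char) (c : Nat) :
    bScan t c 1 = !(t.contains '#') := by
  induction t generalizing c with
  | nil => simp [bScan]
  | cons ch r ih =>
    simp only [bScan]
    by_cases hc : ch = '#'
    · simp [hc]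
    · simp [hc, ih]
      exact fun _ h => hc h.symm

theorem sp_cons_ne (sep c : Char) (t : List Char) (hc : ¬ c = sep) :
    sp sep (c :: t) = (c :: (sp sep t).headI) :: (sp sep t).tail := by
  simp [sp, hc]

theorem okStates_cons_ne (c : Nat) (ch : Char) (t : List Char) (hsep : ¬ ch = ';') :
    okStates c (sp ';' (ch :: t)) = okStates (c + (if ch = ',' then 1 else 0)) (sp ';' t) := by
  rw [sp_cons_ne ';' ch t hsep]
  obtain ⟨s, rest, hs⟩ := List.exists_cons_of_ne_nil (sp_ne_nil ';' t)
  rw [hs]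
  have hcnt : (ch :: s).count ',' = (if ch = ',' then 1 else 0) + s.count ',' := by
    by_cases h : ch = ',' <;> simp [h]
    omega
  simp only [List.headI, List.tail, okStates, hcnt, ← Nat.add_assoc]

theorem beq_succ_three (n : Nat) : ((n + 1) == 3) = (n == 2) := by
  cases h : n == 2 <;> simp_all

theorem scan_eq (cs : List Char) (c : Nat) :
    bScan cs c 0 =
      ((cs.count '#' == 1) && okStates c (sp ';' (cs.takeWhile (· ≠ '#')))) := by
  induction cs generalizing c with
  | nil => simp [bScan, sp, okStates]
  | cons ch t ih =>
    by_cases h1 : ch = ','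
    · have hstep : bScan (ch :: t) c 0 = bScan t (c + 1) 0 := by simp [bScan, h1]
      have htw : (ch :: t).takeWhile (· ≠ '#') = ch :: (t.takeWhile (· ≠ '#')) := by
        simp [h1]
      rw [hstep, ih, htw, okStates_cons_ne c ch _ (by simp [h1])]
      simp [h1]
    · by_cases h2 : ch = ';'
      · have hstep : bScan (ch :: t) c 0 = (if !(c == 2) then false else bScan t 0 0) := by
          simp [bScan, h2]
        have htw : (ch :: t).takeWhile (· ≠ '#') = ch :: (t.takeWhile (· ≠ '#')) := by
          simp [h2]
        have hco : (ch :: t).count '#' = t.count '#' := by simp [h2]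
        rw [hstep, htw, hco]
        have hsp : sp ';' (ch :: t.takeWhile (· ≠ '#')) = [] :: sp ';' (t.takeWhile (· ≠ '#')) := by
          simp [sp, h2]
        rw [hsp, okStates_nil_cons, ← okStates_zero _ (sp_ne_nil ';' (t.takeWhile (· ≠ '#')))]
        by_cases hc2 : c = 2
        · simp [hc2, ih 0]
        · simp [(by simp [hc2] : (c == 2) = false)]
      · by_cases h3 : ch = '#'
        · have hstep : bScan (ch :: t) c 0 = (if !(c == 2) then false else bScan t c 1) := by
            simp [bScan, h3]
          have htw : (ch :: t).takeWhile (· ≠ '#') = [] := by simp [h3]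
          have hco : (ch :: t).count '#' = t.count '#' + 1 := by simp [h3]
          have hok : okStates c [([] : List Char)] = (c + 0 == 2) := by simp [okStates]
          rw [hstep, htw, hco, show sp ';' ([] : List Char) = [[]] from rfl, hok]
          by_cases hc2 : c = 2
          · rw [bScan_one]
            by_cases hm : '#' ∈ t
            · have hc1 : t.contains '#' = true := by simpa using hm
              have hc0 : t.count '#' ≠ 0 := fun h0 => (List.count_eq_zero.mp h0) hm
              have hone : (t.count '#' + 1 == 1) = false := by simp; omega
              simp [hone]
              exact fun _ => hm
            · have hc0 : t.count '#' = 0 := List.count_eq_zero.mpr hm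
              simp [hc0, hc2, hm]
          · simp [hc2]
        · have hstep : bScan (ch :: t) c 0 = bScan t c 0 := by
            simp [bScan, h1, h2, h3]
          have htw : (ch :: t).takeWhile (· ≠ '#') = ch :: (t.takeWhile (· ≠ '#')) := by
            simp [h3]
          have hco : (ch :: t).count '#' = t.count '#' := by simp [h3]
          rw [hstep, htw, hco, okStates_cons_ne c ch _ h2, ih]
          simp [h1]

theorem all_congr_states (l : List (List Char)) (f g : List Char → Bool)
    (h : ∀ a ∈ l, f a = g a) : l.all f = l.all g := by
  induction l with
  | nil => rfl
  | cons a t ih => simp [List.all_cons, h a (by simp), ih (fun x hx => h x (by simp [hx]))]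

theorem isIn_iff_count_pos (cs : List Char) :
    PySem.Chars.isIn ['#'] cs = true ↔ 1 ≤ cs.count '#' := by
  rw [PySem.Chars.isIn_iff_infix]
  constructor
  · rintro ⟨l, r, rfl⟩
    simp [List.count_append]
    omega
  · intro h
    have : '#' ∈ cs := List.count_pos_iff.mp (by omega)
    obtain ⟨l, r, hr⟩ := List.append_of_mem this
    exact ⟨l, r, by simp [hr]⟩

-- ===== VERDICT (by name: the statement is the Claim_ definition above) =====
theorem check_valid_dfa_spec : Claim_equal_check_valid_dfa := by
  intro string _
  show check_valid_dfa string = check_valid_dfa_alt string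
  unfold check_valid_dfa check_valid_dfa_alt
  rw [scan_eq, PySem.Str.isIn_eq,
      show ("#".toList : List Char) = ['#'] from rfl]
  rw [show (";".toList : List Char) = [';'] from rfl,
      show (",".toList : List Char) = [','] from rfl]
  rw [splitOn_eq_sp, length_sp, headI_sp, splitOn_eq_sp]
  by_cases hin : PySem.Chars.isIn ['#'] string.toList = true
  · rw [hin]
    have hcnt : 1 ≤ string.toList.count '#' := (isIn_iff_count_pos _).mp hin
    by_cases h2 : string.toList.count '#' = 1
    · rw [h2]
      simp only [Bool.not_true, Bool.false_eq_true, if_false, show ((1:Nat) + 1 == 2) = true from rfl,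
        Bool.not_true, show ((1:Nat) == 1) = true from rfl, Bool.true_and]
      rw [okStates_zero _ (sp_ne_nil ';' _)]
      apply all_congr_states
      intro st _
      rw [splitOn_eq_sp, length_sp, beq_succ_three]
    · have hne : (string.toList.count '#' + 1 == 2) = false := by simp; omega
      have hne1 : (string.toList.count '#' == 1) = false := by simp [h2]
      simp [hne, hne1]
  · simp only [Bool.not_eq_true] at hin
    rw [hin]
    have h0 : string.toList.count '#' = 0 := by
      by_contra h
      have hpos : PySem.Chars.isIn ['#'] string.toList = true :=
        (isIn_iff_count_pos string.toList).mpr (by omega)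
      rw [hin] at hpos
      exact Bool.false_ne_true hpos
    simp [h0]
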